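-- pv_equiv track=rewrite | github.com/dseferiadis/jamfHelper | inventory.py | is_device_name_unique
-- ===== SOURCE A (Python) =====
-- def is_device_name_unique(name, jsondevices):
--     device_count = 0
--
--     for device in jsondevices["devices"]:
--         if name.lower() == device["name"].lower():
--             device_count = device_count + 1
--             if device_count > 1:
--                 return False
--     return True
-- ===== SOURCE B (Python) =====
-- def is_device_name_unique(name, jsondevices):
--     counts = {}
--     for device in jsondevices["devices"]:
--         key = device["name"].lower()
--         counts[key] = counts.get(key, 0) + 1
--     return counts.get(name.lower(), 0) <= 1
-- ===== Notes on version B (the rewrite author's own statement) =====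
-- stated objective: idiomatic
-- what changed: B builds a frequency table over all lower-cased device names in one pass and then answers with a single lookup (counts.get(name.lower(), 0) <= 1), replacing A's selective per-name counting with its early-exit return.
-- outside the precondition, e.g. on is_device_name_unique('x', {'devices': [{'name': 'X'}, {'name': 'x'}, {}]}): A returns False, B raises KeyError
import Mathlib
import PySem

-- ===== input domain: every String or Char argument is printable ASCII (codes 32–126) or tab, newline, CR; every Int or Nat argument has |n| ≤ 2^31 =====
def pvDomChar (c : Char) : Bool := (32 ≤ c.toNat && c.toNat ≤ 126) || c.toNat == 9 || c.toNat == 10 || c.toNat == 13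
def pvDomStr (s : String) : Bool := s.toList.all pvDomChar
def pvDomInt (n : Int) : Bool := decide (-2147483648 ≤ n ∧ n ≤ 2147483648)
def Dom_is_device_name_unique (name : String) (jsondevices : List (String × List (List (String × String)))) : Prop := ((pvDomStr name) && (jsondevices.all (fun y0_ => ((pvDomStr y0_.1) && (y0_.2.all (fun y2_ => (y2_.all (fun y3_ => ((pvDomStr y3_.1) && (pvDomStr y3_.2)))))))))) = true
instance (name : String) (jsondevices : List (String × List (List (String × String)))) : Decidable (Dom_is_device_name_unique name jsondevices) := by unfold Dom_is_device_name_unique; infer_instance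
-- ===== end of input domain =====

-- B replaces A's early-exit selective counting with a build-whole-frequency-table-then-one-lookup shape (idiomatic; same cost).

-- ===== PORT A =====
-- the for-loop of A over jsondevices["devices"], carrying device_count; early return False on a second match
def pvLoopA (nl : String) : List (List (String × String)) → Int → Bool
  | [], _ => true
  | d :: rest, c =>
    match d.find? (fun q => q.1 == "name") with
    | none => false   -- KeyError in Python: outside Pre_
    | some p =>
      if nl == PySem.Str.lower p.2 then
        (if c + 1 > 1 then false else pvLoopA nl rest (c + 1))
      else pvLoopA nl rest c

def is_device_name_unique (name : String) (jsondevices : List (String × List (List (String × String)))) : Bool :=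
  match jsondevices.find? (fun q => q.1 == "devices") with
  | none => false   -- KeyError in Python: outside Pre_
  | some p => pvLoopA (PySem.Str.lower name) p.2 0

-- ===== PORT B =====
-- B's first loop: populate the counts dict over ALL device names (lower-cased); none = KeyError
def pvCounts (devs : List (List (String × String))) : Option (PySem.Dict String Int) :=
  devs.foldl
    (fun acc d =>
      acc.bind (fun c =>
        (d.find? (fun q => q.1 == "name")).map
          (fun p => c.modify (PySem.Str.lower p.2) 0 (· + 1))))
    (some PySem.Dict.empty)

def is_device_name_unique_alt (name : String) (jsondevices : List (String × List (List (String × String)))) : Bool :=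
  match jsondevices.find? (fun q => q.1 == "devices") with
  | none => false   -- KeyError in Python: outside Pre_
  | some p =>
    match pvCounts p.2 with
    | none => false   -- KeyError in Python: outside Pre_
    | some counts => decide (counts.getD (PySem.Str.lower name) 0 ≤ 1)

-- ===== PRECONDITION & SPEC =====
-- Pre_ excludes inputs on which Python raises KeyError: no "devices" key, or a device dict without a
-- "name" key (there A may still early-return False if a duplicate precedes the malformed device, but B
-- itself raises KeyError on those inputs).
def Pre_is_device_name_unique (name : String) (jsondevices : List (String × List (List (String × String)))) : Prop :=
  ((jsondevices.find? (fun q => q.1 == "devices")).elim false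
    (fun p => p.2.all (fun d => (d.find? (fun q => q.1 == "name")).isSome))) = true

instance (name : String) (jsondevices : List (String × List (List (String × String)))) : Decidable (Pre_is_device_name_unique name jsondevices) := by unfold Pre_is_device_name_unique; infer_instance

def pvWitness_is_device_name_unique : String × (List (String × List (List (String × String)))) :=
  ("Ada", [("devices", [[("name", "ada")], [("name", "bob")]])])

def Spec_is_device_name_unique (name : String) (jsondevices : List (String × List (List (String × String)))) (out : Bool) : Prop := out = is_device_name_unique_alt name jsondevices
instance (name : String) (jsondevices : List (String × List (List (String × String)))) (out : Bool) : Decidable (Spec_is_device_name_unique name jsondevices out) := by unfold Spec_is_device_name_unique; infer_instance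

-- ===== CLAIM (what is proved, stated in full; the proofs are below) =====
def Claim_equal_is_device_name_unique : Prop := ∀ (name : String) (jsondevices : List (String × List (List (String × String)))), Dom_is_device_name_unique name jsondevices → Pre_is_device_name_unique name jsondevices → Spec_is_device_name_unique name jsondevices (is_device_name_unique name jsondevices)

-- ===== LEMMAS AND PROOFS =====

-- the lower-cased name of a device dict (used only by the proofs; total via a dummy default)
def pvNameOf (d : List (String × String)) : String :=
  PySem.Str.lower (((d.find? (fun q => q.1 == "name")).getD ("", "")).2)

-- A's loop returns true iff the initial count plus the number of matching devices stays ≤ 1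
theorem pvLoopA_eq (nl : String) (devs : List (List (String × String))) (c : Int)
    (hk : ∀ d ∈ devs, (d.find? (fun q => q.1 == "name")).isSome = true)
    (hc : 0 ≤ c) (hc1 : c ≤ 1) :
    pvLoopA nl devs c = decide (c + ((devs.map pvNameOf).count nl : Int) ≤ 1) := by
  induction devs generalizing c with
  | nil => simp [pvLoopA]; omega
  | cons d rest ih =>
    have hd := hk d (List.mem_cons_self ..)
    obtain ⟨p, hp⟩ := Option.isSome_iff_exists.mp hd
    have hrest : ∀ d ∈ rest, (d.find? (fun q => q.1 == "name")).isSome = true :=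
      fun d hdm => hk d (List.mem_cons_of_mem _ hdm)
    have hname : pvNameOf d = PySem.Str.lower p.2 := by simp [pvNameOf, hp]
    by_cases heq : nl = PySem.Str.lower p.2
    · subst heq
      have hcnt : ((d :: rest).map pvNameOf).count (PySem.Str.lower p.2)
          = ((rest.map pvNameOf).count (PySem.Str.lower p.2)) + 1 := by
        simp [hname]
      by_cases hbig : c + 1 > 1
      · have hA : pvLoopA (PySem.Str.lower p.2) (d :: rest) c = false := by
          simp [pvLoopA, hp, hbig]
        have hB : ¬ (c + (((d :: rest).map pvNameOf).count (PySem.Str.lower p.2) : Int) ≤ 1) := by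
          rw [hcnt]; push_cast; omega
        rw [hA]; symm; simpa using hB
      · rw [show pvLoopA (PySem.Str.lower p.2) (d :: rest) c = pvLoopA (PySem.Str.lower p.2) rest (c + 1) by
          simp [pvLoopA, hp, hbig]]
        rw [ih (c + 1) hrest (by omega) (by omega), hcnt]
        simp only [decide_eq_decide]
        push_cast
        omega
    · have hne : pvNameOf d ≠ nl := by rw [hname]; exact fun h => heq h.symm
      have hcnt : ((d :: rest).map pvNameOf).count nl = (rest.map pvNameOf).count nl := by
        simp [hne]
      rw [show pvLoopA nl (d :: rest) c = pvLoopA nl rest c by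
        simp [pvLoopA, hp]
        intro h
        exact absurd h heq]
      rw [ih c hrest hc hc1, hcnt]

-- B's table-building loop succeeds and is the modify-counter fold over the lower-cased names
theorem pvCounts_eq (devs : List (List (String × String))) (acc : PySem.Dict String Int)
    (hk : ∀ d ∈ devs, (d.find? (fun q => q.1 == "name")).isSome = true) :
    devs.foldl
      (fun acc d =>
        acc.bind (fun c =>
          (d.find? (fun q => q.1 == "name")).map
            (fun p => c.modify (PySem.Str.lower p.2) 0 (· + 1))))
      (some acc)
    = some ((devs.map pvNameOf).foldl (fun c x => c.modify x 0 (· + 1)) acc) := by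
  induction devs generalizing acc with
  | nil => simp
  | cons d rest ih =>
    have hd := hk d (List.mem_cons_self ..)
    obtain ⟨p, hp⟩ := Option.isSome_iff_exists.mp hd
    have hname : pvNameOf d = PySem.Str.lower p.2 := by simp [pvNameOf, hp]
    simp only [List.foldl_cons, List.map_cons, hp, Option.bind_some, Option.map_some, hname]
    exact ih _ (fun d hdm => hk d (List.mem_cons_of_mem _ hdm))

-- ===== VERDICT (by name: the statement is the Claim_ definition above) =====
theorem is_device_name_unique_spec : Claim_equal_is_device_name_unique := by
  intro name jsondevices _ hpre
  unfold Spec_is_device_name_unique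
  unfold Pre_is_device_name_unique at hpre
  cases hfind : jsondevices.find? (fun q => q.1 == "devices") with
  | none => simp [hfind] at hpre
  | some p =>
    rw [hfind] at hpre
    simp only [Option.elim_some, List.all_eq_true] at hpre
    have hk : ∀ d ∈ p.2, (d.find? (fun q => q.1 == "name")).isSome = true := hpre
    simp only [is_device_name_unique, is_device_name_unique_alt, hfind]
    rw [pvLoopA_eq (PySem.Str.lower name) p.2 0 hk le_rfl (by norm_num)]
    unfold pvCounts
    rw [pvCounts_eq p.2 PySem.Dict.empty hk]
    simp [PySem.Dict.getD_foldl_modify_add_one]
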